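-- pv_equiv track=rewrite | github.com/0xronaldo/JuezVirtualPython | folder_b10/main.py | digitos_decimales
-- ===== SOURCE A (Python) =====
-- def digitos_decimales(n, c):
--     digits = []
--     remainder = 1
--     for _ in range(c):
--         remainder *= 10
--         digit = remainder // n
--         digits.append(str(digit))
--         remainder = remainder % n
--     return digits
-- ===== SOURCE B (Python) =====
-- def digitos_decimales(n, c):
--     # Detect the cycle of the long-division remainders and replicate the
--     # periodic digit block instead of recomputing every digit: O(min(c, |n|)).
--     seen = {}
--     digits = []
--     r = 1
--     i = 0
--     while i < c and r not in seen:
--         seen[r] = i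
--         r *= 10
--         digits.append(str(r // n))
--         r %= n
--         i += 1
--     if i < c:
--         start = seen[r]
--         cycle = digits[start:]
--         q, t = divmod(c - i, len(cycle))
--         digits = digits + cycle * q + cycle[:t]
--     return digits
-- ===== Notes on version B (the rewrite author's own statement) =====
-- stated objective: faster
-- what changed: B detects the first repeated long-division remainder with a dict and replicates the periodic digit block (whole cycles plus a partial cycle), instead of A recomputing every one of the c digits.
import Mathlib
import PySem

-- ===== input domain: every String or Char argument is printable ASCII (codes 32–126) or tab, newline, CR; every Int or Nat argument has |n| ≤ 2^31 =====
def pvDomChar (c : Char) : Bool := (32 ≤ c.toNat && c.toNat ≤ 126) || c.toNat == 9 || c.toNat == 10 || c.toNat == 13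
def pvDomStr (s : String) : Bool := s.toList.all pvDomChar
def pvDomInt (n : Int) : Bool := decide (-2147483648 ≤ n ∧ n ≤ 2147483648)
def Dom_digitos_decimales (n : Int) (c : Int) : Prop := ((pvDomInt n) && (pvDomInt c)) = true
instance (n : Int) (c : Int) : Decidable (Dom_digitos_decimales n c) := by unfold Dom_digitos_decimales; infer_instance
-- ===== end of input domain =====

-- B replaces A's digit-by-digit long division by remainder-cycle detection and
-- replication of the periodic digit block (objective: faster when c exceeds the period).

-- ===== PORT A =====
-- literal port of A: foldl over range(c) carrying (digits, remainder)
def digitos_decimales (n : Int) (c : Int) : List String :=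
  ((PySem.List.pyRange 0 c 1).foldl
    (fun (st : List String × Int) _ =>
      let remainder := st.2 * 10
      let digit := PySem.Int.floordiv remainder n
      (st.1 ++ [PySem.Int.toStr digit], PySem.Int.mod remainder n))
    ([], 1)).1

-- ===== PORT B =====
-- state of B's while loop (seen, digits, r, i); the loop counter i is a Nat
-- (Python's i counts iterations from 0), the fuel c.toNat - i makes the
-- recursion structural and is exactly the 'i < c' bound of the while loop.
structure DDState where
  seen : PySem.Dict Int Nat
  digits : List String
  r : Int
  i : Nat
deriving Repr, DecidableEq

def ddLoop (n : Int) : Nat → DDState → DDState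
  | 0, st => st
  | fuel + 1, st =>
    if (st.seen.get? st.r).isSome then st
    else
      let r10 := st.r * 10
      ddLoop n fuel
        { seen := st.seen.insert st.r st.i
          digits := st.digits ++ [PySem.Int.toStr (PySem.Int.floordiv r10 n)]
          r := PySem.Int.mod r10 n
          i := st.i + 1 }

def digitos_decimales_alt (n : Int) (c : Int) : List String :=
  let st := ddLoop n c.toNat { seen := PySem.Dict.empty, digits := [], r := 1, i := 0 }
  if (st.i : Int) < c then
    let start := st.seen.getD st.r 0          -- seen[r]; the key is present when this branch runs
    let cycle := st.digits.drop start         -- digits[start:] with 0 ≤ start ≤ len(digits)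
    let rem := c - (st.i : Int)
    let q := PySem.Int.floordiv rem (cycle.length : Int)
    let t := PySem.Int.mod rem (cycle.length : Int)
    st.digits ++ (List.replicate q.toNat cycle).flatten ++ cycle.take t.toNat
  else st.digits

-- ===== PRECONDITION & SPEC =====
-- Pre_ excludes exactly the inputs where Python A raises ZeroDivisionError:
-- n = 0 with at least one loop iteration (c > 0). For c ≤ 0 the loop body never
-- runs and A returns [] even for n = 0, so those inputs stay inside Pre_.
def Pre_digitos_decimales (n : Int) (c : Int) : Prop := n ≠ 0 ∨ c ≤ 0
instance (n : Int) (c : Int) : Decidable (Pre_digitos_decimales n c) := by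
  unfold Pre_digitos_decimales; infer_instance
def pvWitness_digitos_decimales : Int × Int := (7, 12)

def Spec_digitos_decimales (n : Int) (c : Int) (out : List String) : Prop := out = digitos_decimales_alt n c
instance (n : Int) (c : Int) (out : List String) : Decidable (Spec_digitos_decimales n c out) := by unfold Spec_digitos_decimales; infer_instance

-- ===== CLAIM (what is proved, stated in full; the proofs are below) =====
def Claim_equal_digitos_decimales : Prop := ∀ (n : Int) (c : Int), Dom_digitos_decimales n c → Pre_digitos_decimales n c → Spec_digitos_decimales n c (digitos_decimales n c)

-- ===== LEMMAS AND PROOFS =====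

-- the pure digit stream of A's long division, starting from remainder r
def ddProduce (n : Int) : Nat → Int → List String
  | 0, _ => []
  | k + 1, r =>
      PySem.Int.toStr (PySem.Int.floordiv (r * 10) n) :: ddProduce n k (PySem.Int.mod (r * 10) n)

-- the remainder after k steps of A's long division, starting from r
def ddIter (n : Int) : Nat → Int → Int
  | 0, r => r
  | k + 1, r => ddIter n k (PySem.Int.mod (r * 10) n)

theorem ddProduce_length (n : Int) (k : Nat) (r : Int) : (ddProduce n k r).length = k := by
  induction k generalizing r with
  | zero => rfl
  | succ k ih => simp [ddProduce, ih]

theorem ddIter_add (n : Int) (a b : Nat) (r : Int) :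
    ddIter n (a + b) r = ddIter n b (ddIter n a r) := by
  induction a generalizing r with
  | zero => rw [Nat.zero_add]; rfl
  | succ a ih =>
      have : a + 1 + b = (a + b) + 1 := by omega
      rw [this]
      simp only [ddIter, ih]

theorem ddProduce_add (n : Int) (a b : Nat) (r : Int) :
    ddProduce n (a + b) r = ddProduce n a r ++ ddProduce n b (ddIter n a r) := by
  induction a generalizing r with
  | zero => rw [Nat.zero_add]; rfl
  | succ a ih =>
      have : a + 1 + b = (a + b) + 1 := by omega
      rw [this]
      simp only [ddProduce, ddIter, ih, List.cons_append]

theorem ddProduce_take (n : Int) (t k : Nat) (r : Int) (h : t ≤ k) :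
    (ddProduce n k r).take t = ddProduce n t r := by
  induction t generalizing k r with
  | zero => simp [ddProduce]
  | succ t ih =>
      cases k with
      | zero => omega
      | succ k =>
          simp only [ddProduce, List.take_succ_cons]
          rw [ih k _ (by omega)]

theorem ddIter_cycle (n : Int) (p : Nat) (r : Int) (h : ddIter n p r = r) (q : Nat) :
    ddIter n (q * p) r = r := by
  induction q with
  | zero => rw [Nat.zero_mul]; rfl
  | succ q ih =>
      have : (q + 1) * p = q * p + p := by ring
      rw [this, ddIter_add, ih, h]

theorem ddProduce_cycle (n : Int) (p : Nat) (r : Int) (h : ddIter n p r = r) (q : Nat) :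
    ddProduce n (q * p) r = (List.replicate q (ddProduce n p r)).flatten := by
  induction q with
  | zero => rw [Nat.zero_mul]; rfl
  | succ q ih =>
      have : (q + 1) * p = p + q * p := by ring
      rw [this, ddProduce_add, h, ih]
      simp [List.replicate_succ]

-- A's foldl over any index list produces exactly ddProduce / ddIter
theorem foldA_eq (n : Int) (l : List Int) (acc : List String) (r : Int) :
    l.foldl (fun (st : List String × Int) _ =>
      (st.1 ++ [PySem.Int.toStr (PySem.Int.floordiv (st.2 * 10) n)], PySem.Int.mod (st.2 * 10) n))
      (acc, r)
    = (acc ++ ddProduce n l.length r, ddIter n l.length r) := by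
  induction l generalizing acc r with
  | nil => simp [ddProduce, ddIter]
  | cons x xs ih => simp [List.foldl_cons, ih, ddProduce, ddIter]

theorem digitos_decimales_eq_produce (n c : Int) :
    digitos_decimales n c = ddProduce n c.toNat 1 := by
  unfold digitos_decimales
  rw [PySem.List.pyRange_one, foldA_eq]
  simp

-- invariant of B's loop
theorem ddLoop_spec (n : Int) (fuel : Nat) (st : DDState)
    (hd : st.digits = ddProduce n st.i 1)
    (hr : st.r = ddIter n st.i 1)
    (hs : ∀ x j, st.seen.get? x = some j → j < st.i ∧ ddIter n j 1 = x) :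
    let st' := ddLoop n fuel st
    st.i ≤ st'.i ∧ st'.i ≤ st.i + fuel ∧
    st'.digits = ddProduce n st'.i 1 ∧ st'.r = ddIter n st'.i 1 ∧
    (st'.i < st.i + fuel →
      ∃ s, st'.seen.get? st'.r = some s ∧ s < st'.i ∧ ddIter n s 1 = st'.r) := by
  induction fuel generalizing st with
  | zero =>
      simp only [ddLoop]
      exact ⟨le_refl _, by omega, hd, hr, fun h => absurd h (by omega)⟩
  | succ fuel ih =>
      show _
      rw [ddLoop]
      by_cases hmem : (st.seen.get? st.r).isSome
      · simp only [hmem, if_true]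
        refine ⟨le_refl _, by omega, hd, hr, ?_⟩
        intro _
        obtain ⟨j, hj⟩ := Option.isSome_iff_exists.mp hmem
        exact ⟨j, hj, (hs _ _ hj).1, (hs _ _ hj).2⟩
      · simp only [hmem, Bool.false_eq_true, if_false]
        have hd' : st.digits ++ [PySem.Int.toStr (PySem.Int.floordiv (st.r * 10) n)]
            = ddProduce n (st.i + 1) 1 := by
          rw [ddProduce_add n st.i 1 1, hd, ← hr]
          rfl
        have hr' : PySem.Int.mod (st.r * 10) n = ddIter n (st.i + 1) 1 := by
          rw [ddIter_add n st.i 1 1, ← hr]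
          rfl
        have hs' : ∀ x j, (st.seen.insert st.r st.i).get? x = some j →
            j < st.i + 1 ∧ ddIter n j 1 = x := by
          intro x j hx
          by_cases hxr : x = st.r
          · subst hxr
            rw [PySem.Dict.get?_insert_self] at hx
            have hji : st.i = j := Option.some_inj.mp hx
            exact ⟨by omega, by rw [← hji]; exact hr.symm⟩
          · rw [PySem.Dict.get?_insert_of_ne _ _ hxr] at hx
            have := hs _ _ hx
            exact ⟨by omega, this.2⟩
        have H := ih ⟨st.seen.insert st.r st.i,
            st.digits ++ [PySem.Int.toStr (PySem.Int.floordiv (st.r * 10) n)],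
            PySem.Int.mod (st.r * 10) n, st.i + 1⟩ hd' hr' hs'
        obtain ⟨H1, H2, H3, H4, H5⟩ := H
        have hmk : (⟨st.seen.insert st.r st.i,
            st.digits ++ [PySem.Int.toStr (PySem.Int.floordiv (st.r * 10) n)],
            PySem.Int.mod (st.r * 10) n, st.i + 1⟩ : DDState).i = st.i + 1 := rfl
        rw [hmk] at H1 H2 H5
        exact ⟨by omega, by omega, H3, H4, fun hlt => H5 (by omega)⟩

theorem mod_bounds_of_pos (a b : Int) (hb : 0 < b) :
    0 ≤ PySem.Int.mod a b ∧ PySem.Int.mod a b < b := by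
  rw [PySem.Int.mod_eq_emod_of_pos hb]
  exact ⟨Int.emod_nonneg a (by omega), Int.emod_lt_of_pos a hb⟩

-- c digits produced from a remainder r with cycle length p: whole cycles then a partial one
theorem produce_split (n : Int) (p : Nat) (hp : 0 < p) (r : Int) (hcyc : ddIter n p r = r)
    (m : Int) (hm0 : 0 < m) :
    ddProduce n m.toNat r =
      (List.replicate (PySem.Int.floordiv m (p : Int)).toNat (ddProduce n p r)).flatten
        ++ (ddProduce n p r).take (PySem.Int.mod m (p : Int)).toNat := by
  have hppz : (0 : Int) < (p : Int) := by exact_mod_cast hp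
  have hdm := PySem.Int.floordiv_mul_add_mod m (p : Int)
  have htb := mod_bounds_of_pos m (p : Int) hppz
  have hqnn : 0 ≤ PySem.Int.floordiv m (p : Int) := by
    by_contra hq
    have hq1 : PySem.Int.floordiv m (p : Int) ≤ -1 := by omega
    have h2 := mul_le_mul_of_nonneg_right hq1 (le_of_lt hppz)
    rw [neg_one_mul] at h2
    omega
  have hcast : (((PySem.Int.floordiv m (p : Int)).toNat * p : Nat) : Int)
      = PySem.Int.floordiv m (p : Int) * (p : Int) := by
    push_cast
    rw [Int.toNat_of_nonneg hqnn]
  have hmN : m.toNat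
      = (PySem.Int.floordiv m (p : Int)).toNat * p + (PySem.Int.mod m (p : Int)).toNat := by
    omega
  rw [hmN, ddProduce_add, ddProduce_cycle n p r hcyc, ddIter_cycle n p r hcyc,
      ddProduce_take n _ p r (by omega)]

-- B also computes the pure digit stream
theorem digitos_decimales_alt_eq_produce (n c : Int) :
    digitos_decimales_alt n c = ddProduce n c.toNat 1 := by
  unfold digitos_decimales_alt
  have h0 : ∀ x j, (PySem.Dict.empty : PySem.Dict Int Nat).get? x = some j →
      j < 0 ∧ ddIter n j 1 = x := by
    intro x j hx
    rw [PySem.Dict.get?_empty] at hx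
    exact absurd hx (by simp)
  have H := ddLoop_spec n c.toNat { seen := PySem.Dict.empty, digits := [], r := 1, i := 0 }
    rfl rfl h0
  obtain ⟨st, hst⟩ : ∃ st, ddLoop n c.toNat { seen := PySem.Dict.empty, digits := [], r := 1, i := 0 } = st :=
    ⟨_, rfl⟩
  rw [hst] at H ⊢
  obtain ⟨hle, hub, hdig, hrit, hfound⟩ := H
  simp only [Nat.zero_add] at hub hfound
  by_cases hic : (st.i : Int) < c
  · simp only [hic, if_true]
    have hic' : st.i < c.toNat := by omega
    obtain ⟨s, hget, hslt, hsit⟩ := hfound hic'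
    clear hfound
    have hgetD : st.seen.getD st.r 0 = s := PySem.Dict.getD_of_get?_eq_some st.seen 0 hget
    rw [hgetD]
    have hfixi : ddIter n st.i 1 = ddIter n s 1 := by
      rw [← hrit]
      exact hsit.symm
    have hcyc : st.digits.drop s = ddProduce n (st.i - s) (ddIter n s 1) := by
      have hsp : st.i = s + (st.i - s) := by omega
      rw [hdig, hsp, ddProduce_add]
      rw [List.drop_append_of_le_length (by rw [ddProduce_length])]
      simp [ddProduce_length]
    have hlen : (st.digits.drop s).length = st.i - s := by
      rw [hcyc, ddProduce_length]
    have hcycle0 : ddIter n (st.i - s) (ddIter n s 1) = ddIter n s 1 := by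
      rw [← ddIter_add]
      have hsp : s + (st.i - s) = st.i := by omega
      rw [hsp]
      exact hfixi
    have hsplit : ddProduce n c.toNat 1
        = ddProduce n st.i 1 ++ ddProduce n (c - (st.i : Int)).toNat (ddIter n st.i 1) := by
      have hcN : c.toNat = st.i + (c - (st.i : Int)).toNat := by omega
      rw [hcN, ddProduce_add]
    have hpp : 0 < st.i - s := by omega
    have hmm : (0 : Int) < c - (st.i : Int) := by omega
    rw [hlen, hcyc, hsplit, hfixi,
        produce_split n (st.i - s) hpp _ hcycle0 (c - (st.i : Int)) hmm, hdig]
    simp [List.append_assoc]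
  · simp only [hic, if_false]
    have : st.i = c.toNat := by omega
    rw [hdig, this]

-- ===== VERDICT (by name: the statement is the Claim_ definition above) =====
theorem digitos_decimales_spec : Claim_equal_digitos_decimales := by
  intro n c _ _
  unfold Spec_digitos_decimales
  rw [digitos_decimales_eq_produce, digitos_decimales_alt_eq_produce]
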